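-- pv_equiv track=rewrite | github.com/jobomat/capito | capito/haleres/utils.py | create_frame_tuple_list
-- ===== SOURCE A (Python) =====
-- from typing import List, Tuple, Dict
--
-- def create_flat_frame_list(frame_text:str):
--     frame_text = frame_text.replace("\n", ",").replace(";", ",").replace(":", "-")
--     frame_list = [f.strip() for f in frame_text.split(",") if f.strip()]
--
--     frame_range = []
--     for frame in frame_list:
--         if '-' in frame:
--             start, end = map(int, frame.split('-'))
--             frame_range.extend(range(start, end + 1))
--         else:
--             frame_range.append(int(frame))
--
--     return sorted(list(set(frame_range)))
--
-- def create_frame_tuple_list(frame_text: str, job_size: int) -> List[Tuple[int,int]]: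
--     """Takes a text which shows a list of frames
--     and returns a list of start-end tuples according to job_size.
--     frame_text is a string where frames:
--       - are presented solo
--       - or as frame ranges (marked by hyphens or colons)
--       - and are separated either by comma, semicolon or newlines
--     """
--     if job_size <= 0:
--         return []
--
--     frame_range = create_flat_frame_list(frame_text)
--
--     if not frame_range:
--         return []
--
--     result = []
--     job_cycler = 0
--     start = frame_range[0]
--     last = start
--     for f in frame_range:
--         if f > last + 1 or job_cycler >= job_size:
--             result.append((start, last))
--             start = f
--             job_cycler = 0
--         if f == frame_range[-1]:
--             result.append((start, f))
--         job_cycler +=1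
--         last = f
--
--     return result
-- ===== SOURCE B (Python) =====
-- from typing import List, Tuple
--
--
-- def create_flat_frame_list(frame_text: str):
--     frame_text = frame_text.replace("\n", ",").replace(";", ",").replace(":", "-")
--     frame_list = [f.strip() for f in frame_text.split(",") if f.strip()]
--
--     frame_range = []
--     for frame in frame_list:
--         if '-' in frame:
--             start, end = map(int, frame.split('-'))
--             frame_range.extend(range(start, end + 1))
--         else:
--             frame_range.append(int(frame))
--
--     return sorted(list(set(frame_range)))
--
--
-- def create_frame_tuple_list(frame_text: str, job_size: int) -> List[Tuple[int, int]]: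
--     """Group the flat frame list into maximal contiguous runs, then cut each
--     run into chunks of at most job_size frames."""
--     if job_size <= 0:
--         return []
--
--     frames = create_flat_frame_list(frame_text)
--     if not frames:
--         return []
--
--     runs = []
--     cur = [frames[0]]
--     for f in frames[1:]:
--         if f == cur[-1] + 1:
--             cur.append(f)
--         else:
--             runs.append(cur)
--             cur = [f]
--     runs.append(cur)
--
--     result = []
--     for run in runs:
--         while run:
--             chunk, run = run[:job_size], run[job_size:]
--             result.append((chunk[0], chunk[-1]))
--     return result
-- ===== Notes on version B (the rewrite author's own statement) =====
-- stated objective: alternative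
-- what changed: A's single interleaved loop with a job-size cycler, pending-chunk state and a special last-element test is replaced by an explicit two-phase pass: first group the sorted frame list into maximal contiguous runs, then cut each run into chunks of at most job_size frames.
import Mathlib
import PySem

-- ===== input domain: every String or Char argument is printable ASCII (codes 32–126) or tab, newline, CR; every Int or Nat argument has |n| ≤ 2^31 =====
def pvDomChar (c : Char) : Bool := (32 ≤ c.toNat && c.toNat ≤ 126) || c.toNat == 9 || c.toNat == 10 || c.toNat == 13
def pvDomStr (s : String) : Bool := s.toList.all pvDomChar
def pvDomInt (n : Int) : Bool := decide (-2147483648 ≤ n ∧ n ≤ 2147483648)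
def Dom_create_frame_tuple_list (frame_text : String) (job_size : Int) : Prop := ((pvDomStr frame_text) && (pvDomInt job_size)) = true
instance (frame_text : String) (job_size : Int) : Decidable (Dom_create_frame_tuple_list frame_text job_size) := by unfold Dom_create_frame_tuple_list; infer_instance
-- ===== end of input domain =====

-- B replaces A's single interleaved counter loop by an explicit two-phase
-- group-into-runs-then-chunk pass; same return value, clearer decomposition (no speed claim).

-- ===== PORT A =====
-- shared helper `create_flat_frame_list` (textually identical in Source A and Source B):
-- tokenisation of the frame text
def pvTokens (frame_text : String) : List (List Char) :=
  let t1 := PySem.Chars.replace frame_text.toList "\n".toList ",".toList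
  let t2 := PySem.Chars.replace t1 ";".toList ",".toList
  let t3 := PySem.Chars.replace t2 ":".toList "-".toList
  ((PySem.Chars.splitOn t3 ",".toList).map PySem.Chars.strip).filter (fun f => f ≠ [])

-- one loop-body step: "a-b" → range(a, b+1), "n" → [n]; none = ValueError
def pvParseTok (t : List Char) : Option (List Int) :=
  if PySem.Chars.isIn "-".toList t then
    match PySem.Chars.splitOn t "-".toList with
    | [a, b] =>
      match PySem.Int.ofChars? a, PySem.Int.ofChars? b with
      | some s, some e => some (PySem.List.pyRange s (e + 1) 1)
      | _, _ => none
    | _ => none  -- `start, end = map(int, ...)` raises unless exactly two parts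
  else
    (PySem.Int.ofChars? t).map (fun n => [n])

def pvFlatLoop : List (List Char) → List Int → Option (List Int)
  | [], acc => some acc
  | t :: rest, acc =>
    match pvParseTok t with
    | some xs => pvFlatLoop rest (acc ++ xs)
    | none => none

-- create_flat_frame_list; none exactly where Python raises ValueError
def create_flat_frame_list (frame_text : String) : Option (List Int) :=
  (pvFlatLoop (pvTokens frame_text) []).map
    (fun fr => PySem.List.sorted (PySem.Set.ofList fr) (fun x => x) false)

-- A's for-loop; state (result, job_cycler, start, last); L = frame_range[-1]
def pvLoopA (j L : Int) : List Int → List (Int × Int) → Int → Int → Int → List (Int × Int)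
  | [], res, _cyc, _start, _last => res
  | f :: rest, res, cyc, start, last =>
    let p : List (Int × Int) × Int × Int :=
      if f > last + 1 ∨ cyc ≥ j then (res ++ [(start, last)], f, 0) else (res, start, cyc)
    let res2 := if f = L then p.1 ++ [(p.2.1, f)] else p.1
    pvLoopA j L rest res2 (p.2.2 + 1) p.2.1 f

def create_frame_tuple_list (frame_text : String) (job_size : Int) : List (Int × Int) :=
  if job_size ≤ 0 then []
  else
    match create_flat_frame_list frame_text with
    | none => []  -- Python raises ValueError here; such inputs are outside Pre_
    | some frame_range =>
      match frame_range with
      | [] => []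
      | h :: t => pvLoopA job_size ((h :: t).getLast (by simp)) (h :: t) [] 0 h h

-- ===== PORT B =====
-- phase 1 of Source B: group the sorted frame list into maximal contiguous runs
def pvRunsLoop : List Int → List (List Int) → List Int → List (List Int)
  | [], runs, cur => runs ++ [cur]
  | f :: rest, runs, cur =>
    if f = (PySem.List.pyGet? cur (-1)).getD 0 + 1 then  -- cur[-1]; cur is never empty
      pvRunsLoop rest runs (cur ++ [f])
    else pvRunsLoop rest (runs ++ [cur]) [f]

-- phase 2 of Source B: `while run: chunk, run = run[:job_size], run[job_size:]; append (chunk[0], chunk[-1])`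
-- fuel = run.length only makes the while-loop structurally total; with job_size ≥ 1 it never runs out
def pvChunkLoop (j : Int) : Nat → List Int → List (Int × Int) → List (Int × Int)
  | 0, _run, res => res
  | fuel + 1, run, res =>
    match run with
    | [] => res
    | _ :: _ =>
      let chunk := PySem.List.slice run none (some j)
      let rest := PySem.List.slice run (some j) none
      pvChunkLoop j fuel rest
        (res ++ [((PySem.List.pyGet? chunk 0).getD 0, (PySem.List.pyGet? chunk (-1)).getD 0)])

def create_frame_tuple_list_alt (frame_text : String) (job_size : Int) : List (Int × Int) :=
  if job_size ≤ 0 then []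
  else
    match create_flat_frame_list frame_text with
    | none => []  -- Python raises ValueError here; such inputs are outside Pre_
    | some frames =>
      match frames with
      | [] => []
      | h :: t =>
        (pvRunsLoop t [] [h]).foldl (fun res run => pvChunkLoop job_size run.length run res) []

-- ===== PRECONDITION & SPEC =====
-- a token parses iff it is an int, or exactly two ints joined by '-'
def pvTokOK (t : List Char) : Bool :=
  if PySem.Chars.isIn "-".toList t then
    match PySem.Chars.splitOn t "-".toList with
    | [a, b] => (PySem.Int.ofChars? a).isSome && (PySem.Int.ofChars? b).isSome
    | _ => false
  else (PySem.Int.ofChars? t).isSome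

-- Pre_ excludes exactly the inputs where Python A raises ValueError: job_size > 0 and some
-- comma/semicolon/newline-separated token that is neither an int nor an int-int range.
def Pre_create_frame_tuple_list (frame_text : String) (job_size : Int) : Prop :=
  job_size ≤ 0 ∨ ∀ t ∈ pvTokens frame_text, pvTokOK t = true

instance (frame_text : String) (job_size : Int) : Decidable (Pre_create_frame_tuple_list frame_text job_size) := by
  unfold Pre_create_frame_tuple_list; infer_instance

def pvWitness_create_frame_tuple_list : String × Int := ("1-5, 8;10:12", 2)

def Spec_create_frame_tuple_list (frame_text : String) (job_size : Int) (out : List (Int × Int)) : Prop := out = create_frame_tuple_list_alt frame_text job_size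
instance (frame_text : String) (job_size : Int) (out : List (Int × Int)) : Decidable (Spec_create_frame_tuple_list frame_text job_size out) := by unfold Spec_create_frame_tuple_list; infer_instance

-- ===== CLAIM (what is proved, stated in full; the proofs are below) =====
def Claim_equal_create_frame_tuple_list : Prop := ∀ (frame_text : String) (job_size : Int), Dom_create_frame_tuple_list frame_text job_size → Pre_create_frame_tuple_list frame_text job_size → Spec_create_frame_tuple_list frame_text job_size (create_frame_tuple_list frame_text job_size)

-- ===== LEMMAS AND PROOFS =====

-- `pvGrab b last l` takes up to b further elements of l while they continue the
-- consecutive run after `last`; returns (last element taken, rest).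
def pvGrab (b last : Int) : List Int → Int × List Int
  | [] => (last, [])
  | f :: r => if b ≤ 0 then (last, f :: r) else if f = last + 1 then pvGrab (b - 1) f r else (last, f :: r)

theorem pvGrab_length (l : List Int) : ∀ (b last : Int), (pvGrab b last l).2.length ≤ l.length := by
  induction l with
  | nil => intro b last; simp [pvGrab]
  | cons f r ih =>
    intro b last
    simp only [pvGrab]
    split_ifs with h1 h2
    · simp
    · exact le_trans (ih _ _) (by simp)
    · simp

-- greedy chunking, one chunk at a time: the common form both loops reduce to
def pvS (j : Int) : List Int → List (Int × Int)
  | [] => []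
  | h :: t => (h, (pvGrab (j - 1) h t).1) :: pvS j (pvGrab (j - 1) h t).2
termination_by l => l.length
decreasing_by
  have := pvGrab_length t (j - 1) h
  simp
  omega

theorem pvGet_neg_one {α : Type} (xs : List α) : PySem.List.pyGet? xs (-1) = xs.getLast? := by
  cases xs with
  | nil => rfl
  | cons h t => simp [PySem.List.pyGet?, PySem.List.pyIdx?, List.getLast?_eq_getElem?]

theorem pvGet_zero {α : Type} (a : α) (l : List α) : PySem.List.pyGet? (a :: l) 0 = some a := by
  simp [PySem.List.pyGet?, PySem.List.pyIdx?]

-- A's loop, from a mid-chunk state (cycler = cyc, open chunk start..last), greedily chunks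
theorem pvLoopA_eq (j L : Int) (_hj : 1 ≤ j) :
    ∀ (l : List Int), l ≠ [] → ∀ (res : List (Int × Int)) (cyc start last : Int),
      (last :: l).Pairwise (· < ·) → l.getLast? = some L →
      pvLoopA j L l res cyc start last =
        res ++ (start, (pvGrab (j - cyc) last l).1) :: pvS j (pvGrab (j - cyc) last l).2 := by
  intro l
  induction l with
  | nil => intro h; exact absurd rfl h
  | cons f rest ih =>
    intro _ res cyc start last hpw hlast
    have hlf : last < f := (List.pairwise_cons.mp hpw).1 f (by simp)
    have hpw' : (f :: rest).Pairwise (· < ·) := (List.pairwise_cons.mp hpw).2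
    by_cases hsplit : f > last + 1 ∨ cyc ≥ j
    · have hgrab : pvGrab (j - cyc) last (f :: rest) = (last, f :: rest) := by
        simp only [pvGrab]
        rcases hsplit with hgap | hcyc
        · split_ifs with h1 h2
          · rfl
          · omega
          · rfl
        · rw [if_pos (by omega)]
      rw [hgrab]
      simp only [pvLoopA, if_pos hsplit]
      cases rest with
      | nil =>
        have hfL : f = L := by simpa using hlast
        simp [pvLoopA, hfL, pvS, pvGrab]
      | cons r2 rs =>
        have hLmem : L ∈ r2 :: rs := List.mem_of_getLast? (by simpa using hlast)
        have hfL : f ≠ L := by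
          have := (List.pairwise_cons.mp hpw').1 L hLmem
          omega
        rw [if_neg hfL]
        simp only [zero_add]
        rw [ih (by simp) (res ++ [(start, last)]) 1 f f hpw' (by simpa using hlast)]
        simp [pvS]
    · have hfe : f = last + 1 := by omega
      have hcyc : ¬ (j - cyc ≤ 0) := by omega
      have hgrab : pvGrab (j - cyc) last (f :: rest) = pvGrab (j - cyc - 1) f rest := by
        simp only [pvGrab, if_neg hcyc, if_pos hfe]
      rw [hgrab]
      simp only [pvLoopA, if_neg hsplit]
      cases rest with
      | nil =>
        have hfL : f = L := by simpa using hlast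
        simp [pvLoopA, hfL, pvGrab, pvS]
      | cons r2 rs =>
        have hLmem : L ∈ r2 :: rs := List.mem_of_getLast? (by simpa using hlast)
        have hfL : f ≠ L := by
          have := (List.pairwise_cons.mp hpw').1 L hLmem
          omega
        rw [if_neg hfL]
        rw [ih (by simp) res (cyc + 1) start f hpw' (by simpa using hlast)]
        have : j - (cyc + 1) = j - cyc - 1 := by ring
        rw [this]

-- A's whole loop equals greedy chunking on a strictly increasing list
theorem pvA_eq_S (j : Int) (hj : 1 ≤ j) (h L : Int) (t : List Int)
    (hp : (h :: t).Pairwise (· < ·)) (hL : (h :: t).getLast? = some L) :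
    pvLoopA j L (h :: t) [] 0 h h = pvS j (h :: t) := by
  have hj0 : ¬ (j ≤ 0) := by omega
  cases t with
  | nil =>
    have hhL : h = L := by simpa using hL
    simp [pvLoopA, pvS, pvGrab, hj0, hhL]
  | cons r2 rs =>
    have hlast? : (r2 :: rs).getLast? = some L := by
      rwa [List.getLast?_cons_cons] at hL
    have hmem : L ∈ r2 :: rs := List.mem_of_getLast? hlast?
    have hfL : h ≠ L := by
      have := (List.pairwise_cons.mp hp).1 _ hmem
      omega
    have hgt : ¬ ((h : Int) > h + 1) := by omega
    have step : pvLoopA j L (h :: r2 :: rs) [] 0 h h = pvLoopA j L (r2 :: rs) [] 1 h h := by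
      conv_lhs => rw [pvLoopA]
      simp [hgt, hj0, hfL]
    rw [step, pvLoopA_eq j L hj (r2 :: rs) (by simp) [] 1 h h hp hlast?]
    simp [pvS]

-- pvGrab along a consecutive run is take/drop
theorem pvGrab_run : ∀ (t : List Int) (b h : Int), 0 ≤ b →
    List.IsChain (fun a b => b = a + 1) (h :: t) →
    pvGrab b h t = ((t.take b.toNat).getLastD h, t.drop b.toNat) := by
  intro t
  induction t with
  | nil => intro b h _ _; simp [pvGrab]
  | cons f r ih =>
    intro b h hb hc
    by_cases h0 : b ≤ 0
    · have : b = 0 := le_antisymm h0 hb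
      subst this
      simp [pvGrab]
    · have hf : f = h + 1 := (List.isChain_cons_cons.mp hc).1
      have hbn : b.toNat = (b - 1).toNat + 1 := by omega
      simp only [pvGrab, if_neg h0, if_pos hf]
      rw [ih (b - 1) f (by omega) (List.isChain_cons_cons.mp hc).2, hbn,
        List.take_succ_cons, List.drop_succ_cons, List.getLastD_cons]

-- Source B's while-loop over one contiguous run produces the greedy chunks
theorem pvChunk_eq_S (j : Int) (hj : 1 ≤ j) :
    ∀ (fuel : Nat) (run : List Int) (res : List (Int × Int)),
      List.IsChain (fun a b => b = a + 1) run → run.length ≤ fuel →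
      pvChunkLoop j fuel run res = res ++ pvS j run := by
  intro fuel
  induction fuel with
  | zero =>
    intro run res _ hlen
    have : run = [] := List.eq_nil_of_length_eq_zero (by omega)
    subst this
    simp [pvChunkLoop, pvS]
  | succ fuel ih =>
    intro run res hc hlen
    cases run with
    | nil => simp [pvChunkLoop, pvS]
    | cons h t =>
      have hjn : j.toNat = (j.toNat - 1) + 1 := by omega
      simp only [pvChunkLoop]
      rw [PySem.List.slice_to _ (by omega), PySem.List.slice_from _ (by omega)]
      rw [hjn, List.take_succ_cons, List.drop_succ_cons]
      rw [pvGet_zero, pvGet_neg_one]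
      have hcd : List.IsChain (fun a b => b = a + 1) ((h :: t).drop j.toNat) := hc.drop _
      rw [hjn, List.drop_succ_cons] at hcd
      have hlen' : (t.drop (j.toNat - 1)).length ≤ fuel := by
        simp at hlen ⊢; omega
      rw [ih (t.drop (j.toNat - 1)) _ hcd hlen']
      have hj1 : (j - 1).toNat = j.toNat - 1 := by omega
      simp [pvS, pvGrab_run t (j - 1) h (by omega) hc, hj1, List.getLast?_cons]

-- pvGrab never crosses a gap
theorem pvGrab_gap : ∀ (t : List Int) (b last : Int) (l : List Int),
    List.IsChain (fun a b => b = a + 1) (last :: t) →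
    (∀ x y, l.head? = some x → (last :: t).getLast? = some y → x ≠ y + 1) →
    pvGrab b last (t ++ l) = ((pvGrab b last t).1, (pvGrab b last t).2 ++ l) := by
  intro t
  induction t with
  | nil =>
    intro b last l _ hgap
    cases l with
    | nil => simp [pvGrab]
    | cons x r =>
      have hx : x ≠ last + 1 := hgap x last rfl (by simp)
      simp [pvGrab, hx]
  | cons f r ih =>
    intro b last l hc hgap
    by_cases h0 : b ≤ 0
    · simp [pvGrab, h0]
    · have hf : f = last + 1 := (List.isChain_cons_cons.mp hc).1
      simp only [List.cons_append, pvGrab, if_neg h0, if_pos hf]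
      exact ih (b - 1) f l (List.isChain_cons_cons.mp hc).2
        (by intro x y hx hy; exact hgap x y hx (by simpa using hy))

-- greedy chunking splits at a gap
theorem pvS_gap (j : Int) (hj : 1 ≤ j) :
    ∀ (n : Nat) (r : List Int), r.length ≤ n → r ≠ [] →
      List.IsChain (fun a b => b = a + 1) r →
      ∀ l, (∀ x y, l.head? = some x → r.getLast? = some y → x ≠ y + 1) →
      pvS j (r ++ l) = pvS j r ++ pvS j l := by
  intro n
  induction n with
  | zero =>
    intro r hlen hne _ _ _
    exact absurd (List.eq_nil_of_length_eq_zero (by omega)) hne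
  | succ n ih =>
    intro r hlen hne hc l hgap
    cases r with
    | nil => exact absurd rfl hne
    | cons h t =>
      simp only [List.cons_append, pvS]
      rw [pvGrab_gap t (j - 1) h l hc hgap]
      have hrun := pvGrab_run t (j - 1) h (by omega) hc
      by_cases hg2 : (pvGrab (j - 1) h t).2 = []
      · rw [hg2]
        simp [pvS]
      · have hsfx : (pvGrab (j - 1) h t).2 = (h :: t).drop ((j - 1).toNat + 1) := by
          rw [hrun]; simp
        have hc2 : List.IsChain (fun a b => b = a + 1) (pvGrab (j - 1) h t).2 := by
          rw [hsfx]; exact hc.drop _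
        have hlen2 : (pvGrab (j - 1) h t).2.length ≤ n := by
          have := pvGrab_length t (j - 1) h
          simp at hlen; omega
        have hlast2 : (pvGrab (j - 1) h t).2.getLast? = (h :: t).getLast? := by
          conv_rhs => rw [← List.take_append_drop ((j - 1).toNat + 1) (h :: t), ← hsfx]
          exact (List.getLast?_append_of_ne_nil _ hg2).symm
        have hgap2 : ∀ x y, l.head? = some x → (pvGrab (j - 1) h t).2.getLast? = some y → x ≠ y + 1 := by
          intro x y hx hy
          rw [hlast2] at hy
          exact hgap x y hx hy
        rw [ih (pvGrab (j - 1) h t).2 hlen2 hg2 hc2 l hgap2]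

theorem pvRunsLoop_acc : ∀ (l : List Int) (runs : List (List Int)) (cur : List Int),
    pvRunsLoop l runs cur = runs ++ pvRunsLoop l [] cur := by
  intro l
  induction l with
  | nil => intro runs cur; simp [pvRunsLoop]
  | cons f rest ih =>
    intro runs cur
    simp only [pvRunsLoop]
    split_ifs with h
    · rw [ih runs (cur ++ [f])]
    · rw [ih (runs ++ [cur]) [f], ih ([] ++ [cur]) [f]]
      simp

-- Source B's two phases compute the greedy chunks
theorem pvRuns_eq_S (j : Int) (hj : 1 ≤ j) :
    ∀ (l cur : List Int) (res : List (Int × Int)), cur ≠ [] →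
      List.IsChain (fun a b => b = a + 1) cur → (cur ++ l).Pairwise (· < ·) →
      (pvRunsLoop l [] cur).foldl (fun res run => pvChunkLoop j run.length run res) res =
        res ++ pvS j (cur ++ l) := by
  intro l
  induction l with
  | nil =>
    intro cur res hne hc _
    simp only [pvRunsLoop, List.nil_append, List.foldl_cons, List.foldl_nil]
    rw [pvChunk_eq_S j hj cur.length cur res hc le_rfl]
    simp
  | cons f rest ih =>
    intro cur res hne hc hpw
    cases cur with
    | nil => exact absurd rfl hne
    | cons c0 cs =>
      have hglast : (c0 :: cs).getLast? = some (cs.getLastD c0) := by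
        rw [List.getLast?_cons, List.getLastD_eq_getLast?]
      simp only [pvRunsLoop, pvGet_neg_one, hglast, Option.getD_some]
      by_cases hif : f = cs.getLastD c0 + 1
      · rw [if_pos hif]
        have hc' : List.IsChain (fun a b => b = a + 1) ((c0 :: cs) ++ [f]) := by
          rw [List.isChain_append]
          refine ⟨hc, by simp, ?_⟩
          intro x hx y hy
          rw [hglast] at hx
          simp only [Option.mem_def, Option.some.injEq, List.head?_cons] at hx hy
          rw [← hx, ← hy]
          exact hif
        have hpw' : (((c0 :: cs) ++ [f]) ++ rest).Pairwise (· < ·) := by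
          simpa [List.append_assoc] using hpw
        rw [ih ((c0 :: cs) ++ [f]) res (by simp) hc' hpw']
        simp [List.append_assoc]
      · rw [if_neg hif]
        rw [pvRunsLoop_acc rest ([] ++ [c0 :: cs]) [f], List.foldl_append]
        simp only [List.nil_append, List.foldl_cons, List.foldl_nil]
        rw [pvChunk_eq_S j hj (c0 :: cs).length (c0 :: cs) res hc le_rfl]
        have hpwf : ((f :: rest) : List Int).Pairwise (· < ·) :=
          hpw.sublist (List.sublist_append_right _ _)
        rw [ih [f] (res ++ pvS j (c0 :: cs)) (by simp) (by simp) (by simpa using hpwf)]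
        have hgap : ∀ x y, (f :: rest).head? = some x → (c0 :: cs).getLast? = some y → x ≠ y + 1 := by
          intro x y hx hy
          rw [hglast] at hy
          simp only [Option.some.injEq, List.head?_cons] at hx hy
          rw [← hx, ← hy]
          exact hif
        rw [List.singleton_append, List.append_assoc,
          ← pvS_gap j hj (c0 :: cs).length (c0 :: cs) le_rfl hne hc (f :: rest) hgap]

theorem pvFlat_some : ∀ (toks : List (List Char)), (∀ t ∈ toks, pvTokOK t = true) →
    ∀ acc, ∃ l, pvFlatLoop toks acc = some l := by
  intro toks
  induction toks with
  | nil => intro _ acc; exact ⟨acc, rfl⟩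
  | cons t rest ih =>
    intro h acc
    have ht := h t (by simp)
    have hp : ∃ xs, pvParseTok t = some xs := by
      unfold pvTokOK at ht
      unfold pvParseTok
      split_ifs at ht ⊢ with hin
      · cases hsp : PySem.Chars.splitOn t "-".toList with
        | nil => rw [hsp] at ht; simp at ht
        | cons a as =>
          cases as with
          | nil => rw [hsp] at ht; simp at ht
          | cons b bs =>
            cases bs with
            | nil =>
              rw [hsp] at ht
              simp at ht
              obtain ⟨na, hna⟩ := Option.isSome_iff_exists.mp ht.1
              obtain ⟨nb, hnb⟩ := Option.isSome_iff_exists.mp ht.2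
              exact ⟨PySem.List.pyRange na (nb + 1) 1, by simp [hna, hnb]⟩
            | cons c cs => rw [hsp] at ht; simp at ht
      · obtain ⟨n, hn⟩ := Option.isSome_iff_exists.mp ht
        exact ⟨[n], by rw [hn]; rfl⟩
    obtain ⟨xs, hxs⟩ := hp
    simp only [pvFlatLoop, hxs]
    exact ih (fun t' ht' => h t' (by simp [ht'])) (acc ++ xs)

-- ===== VERDICT (by name: the statement is the Claim_ definition above) =====
theorem create_frame_tuple_list_spec : Claim_equal_create_frame_tuple_list := by
  intro ft j _hdom hpre
  unfold Spec_create_frame_tuple_list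
  by_cases hj : j ≤ 0
  · simp [create_frame_tuple_list, create_frame_tuple_list_alt, hj]
  · have hj1 : 1 ≤ j := by omega
    have htok : ∀ t ∈ pvTokens ft, pvTokOK t = true := by
      rcases hpre with h | h
      · omega
      · exact h
    obtain ⟨l0, hl0⟩ := pvFlat_some (pvTokens ft) htok []
    have hfr : create_flat_frame_list ft =
        some (PySem.List.sorted (PySem.Set.ofList l0) (fun x => x) false) := by
      simp [create_flat_frame_list, hl0]
    have hpw : (PySem.List.sorted (PySem.Set.ofList l0) (fun x => x) false).Pairwise (· < ·) :=
      PySem.List.sorted_ofList_pairwise_lt l0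
    simp only [create_frame_tuple_list, create_frame_tuple_list_alt, hfr, if_neg hj]
    cases hfrm : PySem.List.sorted (PySem.Set.ofList l0) (fun x => x) false with
    | nil => rfl
    | cons h t =>
      rw [hfrm] at hpw
      show pvLoopA j ((h :: t).getLast (by simp)) (h :: t) [] 0 h h =
        List.foldl (fun res run => pvChunkLoop j run.length run res) [] (pvRunsLoop t [] [h])
      rw [pvA_eq_S j hj1 h ((h :: t).getLast (by simp)) t hpw
        (List.getLast?_eq_some_getLast _)]
      rw [pvRuns_eq_S j hj1 t [h] [] (by simp) (by simp) (by simpa using hpw)]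
      simp
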